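-- pv_equiv track=rewrite | github.com/mccuskero/py-lclg-prompt-xml-strategies | src/lclg/supervisor-multi-agent-create-car/src/agents/supervisor_agent.py | _infer_vehicle_type
-- ===== SOURCE A (Python) =====
-- def _infer_vehicle_type(make: str, model: str) -> str:
--     """Infer vehicle type from make and model."""
--     model_lower = model.lower()
--
--     if any(keyword in model_lower for keyword in ["truck", "f-150", "silverado", "ram"]):
--         return "truck"
--     elif any(keyword in model_lower for keyword in ["suv", "explorer", "tahoe", "suburban"]):
--         return "suv"
--     elif any(keyword in model_lower for keyword in ["coupe", "corvette", "mustang", "camaro"]):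
--         return "coupe"
--     elif any(keyword in model_lower for keyword in ["hatchback", "civic", "focus"]):
--         return "hatchback"
--     elif any(keyword in model_lower for keyword in ["wagon", "outback", "forester"]):
--         return "wagon"
--     elif any(keyword in model_lower for keyword in ["convertible", "roadster"]):
--         return "convertible"
--     else:
--         return "sedan"  # Default
-- ===== SOURCE B (Python) =====
-- # B: no early-exit cascade; one overwriting sweep from lowest to highest priority.
-- # A keyword match later in the sweep (= higher priority) overwrites any earlier
-- # match, so the final rank is the highest-priority matching category.
--
-- _TYPES = ["truck", "suv", "coupe", "hatchback", "wagon", "convertible", "sedan"]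
--
-- _KEYWORDS_LOW_TO_HIGH = [
--     ("convertible", 5), ("roadster", 5),
--     ("wagon", 4), ("outback", 4), ("forester", 4),
--     ("hatchback", 3), ("civic", 3), ("focus", 3),
--     ("coupe", 2), ("corvette", 2), ("mustang", 2), ("camaro", 2),
--     ("suv", 1), ("explorer", 1), ("tahoe", 1), ("suburban", 1),
--     ("truck", 0), ("f-150", 0), ("silverado", 0), ("ram", 0),
-- ]
--
--
-- def _infer_vehicle_type(make: str, model: str) -> str:
--     """Infer vehicle type from make and model."""
--     model_lower = model.lower()
--     best = 6  # rank of the default "sedan"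
--     for keyword, rank in _KEYWORDS_LOW_TO_HIGH:
--         if keyword in model_lower:
--             best = rank
--     return _TYPES[best]
-- ===== Notes on version B (the rewrite author's own statement) =====
-- stated objective: alternative
-- what changed: Replaced the short-circuiting if/elif cascade of per-category any() scans by one exhaustive overwriting sweep over all keywords ordered from lowest to highest priority, keeping a rank accumulator and indexing a type table at the end (no early return, no per-category grouping).
import Mathlib
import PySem

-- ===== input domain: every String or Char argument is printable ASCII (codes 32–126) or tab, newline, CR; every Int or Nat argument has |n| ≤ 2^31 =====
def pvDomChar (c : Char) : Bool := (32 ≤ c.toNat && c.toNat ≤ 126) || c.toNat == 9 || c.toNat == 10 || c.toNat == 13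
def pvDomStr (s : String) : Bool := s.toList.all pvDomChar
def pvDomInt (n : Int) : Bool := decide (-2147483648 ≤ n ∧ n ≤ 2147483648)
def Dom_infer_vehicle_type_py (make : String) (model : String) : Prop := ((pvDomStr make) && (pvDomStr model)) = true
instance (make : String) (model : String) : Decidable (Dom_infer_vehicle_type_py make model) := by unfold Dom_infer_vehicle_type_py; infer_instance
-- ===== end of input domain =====

-- B replaces A's short-circuiting if/elif cascade by one exhaustive overwriting sweep over
-- all keywords from lowest to highest priority with a rank accumulator (objective: alternative).

-- ===== PORT A =====
def infer_vehicle_type_py (make : String) (model : String) : String :=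
  let model_lower := PySem.Str.lower model
  if ["truck", "f-150", "silverado", "ram"].any (fun k => PySem.Str.isIn k model_lower) then
    "truck"
  else if ["suv", "explorer", "tahoe", "suburban"].any (fun k => PySem.Str.isIn k model_lower) then
    "suv"
  else if ["coupe", "corvette", "mustang", "camaro"].any (fun k => PySem.Str.isIn k model_lower) then
    "coupe"
  else if ["hatchback", "civic", "focus"].any (fun k => PySem.Str.isIn k model_lower) then
    "hatchback"
  else if ["wagon", "outback", "forester"].any (fun k => PySem.Str.isIn k model_lower) then
    "wagon"
  else if ["convertible", "roadster"].any (fun k => PySem.Str.isIn k model_lower) then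
    "convertible"
  else
    "sedan"

-- ===== PORT B =====
def vehicleTypes : List String :=
  ["truck", "suv", "coupe", "hatchback", "wagon", "convertible", "sedan"]

def keywordsLowToHigh : List (String × Int) :=
  [ ("convertible", 5), ("roadster", 5),
    ("wagon", 4), ("outback", 4), ("forester", 4),
    ("hatchback", 3), ("civic", 3), ("focus", 3),
    ("coupe", 2), ("corvette", 2), ("mustang", 2), ("camaro", 2),
    ("suv", 1), ("explorer", 1), ("tahoe", 1), ("suburban", 1),
    ("truck", 0), ("f-150", 0), ("silverado", 0), ("ram", 0) ]

def infer_vehicle_type_py_alt (make : String) (model : String) : String :=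
  let model_lower := PySem.Str.lower model
  let best : Int := keywordsLowToHigh.foldl
    (fun acc p => if PySem.Str.isIn p.1 model_lower then p.2 else acc) 6
  -- _TYPES[best]: best is always 0..6, in range, so the getD default is never used
  (PySem.List.pyGet? vehicleTypes best).getD ""

-- ===== PRECONDITION & SPEC =====
def Spec_infer_vehicle_type_py (make : String) (model : String) (out : String) : Prop := out = infer_vehicle_type_py_alt make model
instance (make : String) (model : String) (out : String) : Decidable (Spec_infer_vehicle_type_py make model out) := by unfold Spec_infer_vehicle_type_py; infer_instance

-- ===== CLAIM (what is proved, stated in full; the proofs are below) =====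
def Claim_equal_infer_vehicle_type_py : Prop := ∀ (make : String) (model : String), Dom_infer_vehicle_type_py make model → Spec_infer_vehicle_type_py make model (infer_vehicle_type_py make model)

-- ===== LEMMAS AND PROOFS =====

-- A fold over keywords that all carry the same rank r sets the accumulator to r
-- exactly when some keyword of the group matches.
theorem foldl_const_rank (m : String) (r a : Int) (kws : List String) :
    List.foldl (fun acc p => if PySem.Str.isIn p.1 m then p.2 else acc) a
      (kws.map (fun k => (k, r)))
    = if kws.any (fun k => PySem.Str.isIn k m) then r else a := by
  induction kws generalizing a with
  | nil => simp
  | cons k ks ih =>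
    simp only [List.map_cons, List.foldl_cons, ih, List.any_cons]
    by_cases h : PySem.Str.isIn k m = true
    · simp only [h, if_true, Bool.true_or, ite_self]
    · rw [Bool.not_eq_true] at h
      simp only [h, Bool.false_or, Bool.false_eq_true, if_false]

theorem infer_vehicle_type_eq (make model : String) :
    infer_vehicle_type_py make model = infer_vehicle_type_py_alt make model := by
  unfold infer_vehicle_type_py infer_vehicle_type_py_alt
  have htable : keywordsLowToHigh
      = (["convertible", "roadster"].map (fun k => (k, (5 : Int))))
        ++ (["wagon", "outback", "forester"].map (fun k => (k, (4 : Int))))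
        ++ (["hatchback", "civic", "focus"].map (fun k => (k, (3 : Int))))
        ++ (["coupe", "corvette", "mustang", "camaro"].map (fun k => (k, (2 : Int))))
        ++ (["suv", "explorer", "tahoe", "suburban"].map (fun k => (k, (1 : Int))))
        ++ (["truck", "f-150", "silverado", "ram"].map (fun k => (k, (0 : Int)))) := rfl
  rw [htable]
  simp only [List.foldl_append, foldl_const_rank]
  set m := PySem.Str.lower model
  by_cases h1 : ["truck", "f-150", "silverado", "ram"].any (fun k => PySem.Str.isIn k m) = true <;>
  by_cases h2 : ["suv", "explorer", "tahoe", "suburban"].any (fun k => PySem.Str.isIn k m) = true <;>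
  by_cases h3 : ["coupe", "corvette", "mustang", "camaro"].any (fun k => PySem.Str.isIn k m) = true <;>
  by_cases h4 : ["hatchback", "civic", "focus"].any (fun k => PySem.Str.isIn k m) = true <;>
  by_cases h5 : ["wagon", "outback", "forester"].any (fun k => PySem.Str.isIn k m) = true <;>
  by_cases h6 : ["convertible", "roadster"].any (fun k => PySem.Str.isIn k m) = true <;>
    simp only [Bool.not_eq_true] at h1 h2 h3 h4 h5 h6 ⊢ <;>
    simp only [h1, h2, h3, h4, h5, h6] <;> rfl

-- ===== VERDICT (by name: the statement is the Claim_ definition above) =====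
theorem infer_vehicle_type_py_spec : Claim_equal_infer_vehicle_type_py := by
  intro make model _
  exact infer_vehicle_type_eq make model
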